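-- pv_equiv track=rewrite | github.com/bj0/aoc | aoc/2018/d8_2.py | parse
-- ===== SOURCE A (Python) =====
-- from collections import defaultdict
--
-- def parse(data):
--     kids, meta = data[:2]
--     p1 = 0
--     value = defaultdict(int)
--     data = data[2:]
--     for i in range(kids):
--         for data, kid, val in parse(data):
--             # yield '>', kid, val
--             pass
--         p1 += kid
--         value[i] = val
--
--     mdata = data[:meta]
--     value = sum(mdata) if kids == 0 else sum(value[i - 1] for i in mdata)
--     yield data[meta:], (p1 + sum(mdata)), value
-- ===== SOURCE B (Python) =====
-- def parse(data):
--     # One-pass iterative tree walk with an explicit stack of frames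
--     # [children_remaining, kids, meta, child_values]; yields one tuple
--     # (remaining data, total metadata sum, root value).
--     def run(data):
--         total = 0
--         stack = []
--         while True:
--             kids, meta = data[0], data[1]
--             data = data[2:]
--             stack.append([kids, kids, meta, []])
--             while stack[-1][0] <= 0:
--                 _, kids, meta, childs = stack.pop()
--                 mdata = data[:meta]
--                 data = data[meta:]
--                 total += sum(mdata)
--                 if kids == 0:
--                     value = sum(mdata)
--                 else:
--                     value = sum(childs[i - 1] if 0 <= i - 1 < len(childs) else 0
--                                 for i in mdata)
--                 if not stack:
--                     return data, total, value
--                 stack[-1][0] -= 1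
--                 stack[-1][3].append(value)
--     yield run(data)
-- ===== Notes on version B (the rewrite author's own statement) =====
-- stated objective: alternative
-- what changed: Replaces A's recursive generator (re-invoking parse per child and keeping child values in a defaultdict) by a single iterative loop with an explicit stack of (children-remaining, kids, meta, child-values) frames; Pre_ excludes malformed inputs (data not encoding a complete node), on which A raises ValueError and B raises IndexError.
import Mathlib
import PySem

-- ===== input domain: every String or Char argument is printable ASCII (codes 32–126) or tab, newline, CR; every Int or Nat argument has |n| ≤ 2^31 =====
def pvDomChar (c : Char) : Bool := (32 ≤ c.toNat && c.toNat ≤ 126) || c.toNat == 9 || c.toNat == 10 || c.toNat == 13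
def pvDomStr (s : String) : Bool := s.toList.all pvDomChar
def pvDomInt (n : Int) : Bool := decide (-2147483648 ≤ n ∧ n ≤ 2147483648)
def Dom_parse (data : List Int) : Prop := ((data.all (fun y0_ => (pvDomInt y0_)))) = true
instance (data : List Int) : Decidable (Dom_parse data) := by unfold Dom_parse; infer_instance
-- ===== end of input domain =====

-- B replaces A's recursive generator by an explicit iterative stack machine (one pass over the
-- list with frames of (children-remaining, kids, meta, child-values)); same yielded tuple.

-- ===== PORT A =====
-- A is a generator that yields exactly one tuple; 'parse' returns the list of yielded tuples.
-- The recursion is run with fuel |data|+1 (each recursive call consumes ≥ 2 elements, so the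
-- fuel never runs out on inputs where the Python returns); none = the ValueError on short data.
def parseA : Nat → List Int → Option (List Int × Int × Int)
  | 0, _ => none
  | fuel+1, data =>
    match data with
    | kids :: met :: rest =>
      -- for i in range(kids): recurse, p1 += kid, value[i] = val   (value = defaultdict(int))
      match (PySem.List.pyRange 0 kids 1).foldl
          (fun acc i => acc.bind (fun s =>
            (parseA fuel s.1).map (fun r => (r.1, s.2.1 + r.2.1, s.2.2.insert i r.2.2))))
          (some (rest, (0 : Int), (PySem.Dict.empty : PySem.Dict Int Int))) with
      | none => none
      | some (d, p1, dict) =>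
        let mdata := PySem.List.slice d none (some met)
        let value := if kids = 0 then mdata.sum
                     else (mdata.map (fun i => dict.getD (i - 1) 0)).sum
        some (PySem.List.slice d (some met) none, p1 + mdata.sum, value)
    | _ => none

def parse (data : List Int) : List (List Int × Int × Int) :=
  match parseA (data.length + 1) data with
  | some r => [r]
  | none => []

-- ===== PORT B =====
-- 'childs[i - 1] if 0 <= i - 1 < len(childs) else 0'
def bLook (childs : List Int) (i : Int) : Int :=
  if 0 ≤ i - 1 ∧ i - 1 < (childs.length : Int) then childs.getD (i - 1).toNat 0 else 0

-- the inner 'while stack[-1][0] <= 0' completion loop; frames are (remaining, kids, meta, childs).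
-- inl = 'return data, total, value' (stack emptied), inr = back to the outer loop.
-- (the top frame is held apart from the rest of the stack so the loop is structural recursion)
def bCompleteGo : List Int → Int → (Int × Int × Int × List Int) →
    List (Int × Int × Int × List Int) →
    (List Int × Int × Int) ⊕ (List Int × Int × List (Int × Int × Int × List Int))
  | data, total, (rem, kids, met, childs), rest =>
    if rem ≤ 0 then
      let mdata := PySem.List.slice data none (some met)
      let data' := PySem.List.slice data (some met) none
      let total' := total + mdata.sum
      let value := if kids = 0 then mdata.sum else (mdata.map (bLook childs)).sum
      match rest with
      | [] => Sum.inl (data', total', value)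
      | (rem2, k2, m2, c2) :: rest2 =>
        bCompleteGo data' total' (rem2 - 1, k2, m2, c2 ++ [value]) rest2
    else Sum.inr (data, total, (rem, kids, met, childs) :: rest)

def bComplete (data : List Int) (total : Int) (stack : List (Int × Int × Int × List Int)) :
    (List Int × Int × Int) ⊕ (List Int × Int × List (Int × Int × Int × List Int)) :=
  match stack with
  | [] => Sum.inr (data, total, [])
  | top :: rest => bCompleteGo data total top rest

-- the outer loop only ever shortens the data (cited by bRun's decreasing_by)
theorem bCompleteGo_inr_length : ∀ (rest : List (Int × Int × Int × List Int))
    (data : List Int) (total : Int) top {d' : List Int} {t' : Int} {st'},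
    bCompleteGo data total top rest = Sum.inr (d', t', st') → d'.length ≤ data.length := by
  intro rest
  induction rest with
  | nil =>
    intro data total top d' t' st' h
    obtain ⟨rem, kids, met, childs⟩ := top
    rw [bCompleteGo] at h
    by_cases hr : rem ≤ 0
    · rw [if_pos hr] at h
      exact absurd h (by simp)
    · rw [if_neg hr] at h
      simp only [Sum.inr.injEq, Prod.mk.injEq] at h
      rw [← h.1]
  | cons fr2 rest2 ih =>
    intro data total top d' t' st' h
    obtain ⟨rem, kids, met, childs⟩ := top
    obtain ⟨rem2, k2, m2, c2⟩ := fr2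
    rw [bCompleteGo] at h
    by_cases hr : rem ≤ 0
    · rw [if_pos hr] at h
      have h2 := ih _ _ _ h
      have h3 : (PySem.List.slice data (some met) none).length ≤ data.length := by
        simp [PySem.List.slice_some_none]
      omega
    · rw [if_neg hr] at h
      simp only [Sum.inr.injEq, Prod.mk.injEq] at h
      rw [← h.1]

theorem bComplete_inr_length (stack : List (Int × Int × Int × List Int))
    (data : List Int) (total : Int) {d' : List Int} {t' : Int} {st'}
    (h : bComplete data total stack = Sum.inr (d', t', st')) : d'.length ≤ data.length := by
  match stack, h with
  | [], h =>
    simp only [bComplete, Sum.inr.injEq, Prod.mk.injEq] at h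
    rw [← h.1]
  | top :: rest, h => exact bCompleteGo_inr_length rest data total top h

-- the outer 'while True' loop: read a header, push a frame, run the completion loop;
-- none = the IndexError B's 'data[0], data[1]' raises on data shorter than 2
def bRun (data : List Int) (total : Int) (stack : List (Int × Int × Int × List Int)) :
    Option (List Int × Int × Int) :=
  match data with
  | kids :: met :: rest =>
    match h : bComplete rest total ((kids, kids, met, []) :: stack) with
    | Sum.inl a => some a
    | Sum.inr (d', t', st') => bRun d' t' st'
  | _ => none
termination_by data.length
decreasing_by
  have := bComplete_inr_length ((kids, kids, met, []) :: stack) rest total h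
  simp only [List.length_cons]
  omega

def parse_alt (data : List Int) : List (List Int × Int × Int) :=
  match bRun data 0 [] with
  | some r => [r]
  | none => []

-- ===== PRECONDITION & SPEC =====
-- Pre_parse excludes exactly the malformed inputs (data not encoding a complete node), on which
-- A raises ValueError: A's recursive header reads never hit a list shorter than 2.  skipF n d
-- walks n consecutive node encodings (header, children, meta slice) and returns the remainder;
-- the Nat bound only pads the recursion (|data|+1 is always enough: each nesting step first
-- consumes a 2-element header).
def skipF : Nat → Nat → List Int → Option (List Int)
  | _, 0, d => some d
  | 0, _+1, _ => none
  | f+1, n+1, d =>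
    match d with
    | k :: m :: rest =>
      (skipF f k.toNat rest).bind (fun r1 => skipF f n (PySem.List.slice r1 (some m) none))
    | _ => none

def Pre_parse (data : List Int) : Prop := (skipF (data.length + 1) 1 data).isSome = true
instance (data : List Int) : Decidable (Pre_parse data) := by unfold Pre_parse; infer_instance

def pvWitness_parse : List Int := [2, 3, 0, 3, 10, 11, 12, 1, 1, 0, 1, 99, 2, 1, 1, 2]

def Spec_parse (data : List Int) (out : List (List Int × Int × Int)) : Prop := out = parse_alt data
instance (data : List Int) (out : List (List Int × Int × Int)) : Decidable (Spec_parse data out) := by unfold Spec_parse; infer_instance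

-- ===== CLAIM (what is proved, stated in full; the proofs are below) =====
def Claim_equal_parse : Prop := ∀ (data : List Int), Dom_parse data → Pre_parse data → Spec_parse data (parse data)

-- ===== LEMMAS AND PROOFS =====

-- the continuation of B's machine after a completed node yields value v with remainder d, total t
def afterChild (d : List Int) (t : Int) (stack : List (Int × Int × Int × List Int)) (v : Int) :
    Option (List Int × Int × Int) :=
  match stack with
  | [] => some (d, t, v)
  | (rem, kids, met, childs) :: rest =>
    match bComplete d t ((rem - 1, kids, met, childs ++ [v]) :: rest) with
    | Sum.inl a => some a
    | Sum.inr (d', t', st') => bRun d' t' st'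

theorem bRun_cons (kids met : Int) (rest : List Int) (total : Int) stack :
    bRun (kids :: met :: rest) total stack =
      match bComplete rest total ((kids, kids, met, []) :: stack) with
      | Sum.inl a => some a
      | Sum.inr (d', t', st') => bRun d' t' st' := by
  rw [bRun.eq_def]
  dsimp only
  split <;> rename_i hb <;> rw [hb]

theorem foldA_none (fuel : Nat) (is : List Int) :
    is.foldl (fun acc i => acc.bind (fun s : List Int × Int × PySem.Dict Int Int =>
      (parseA fuel s.1).map (fun r => (r.1, s.2.1 + r.2.1, s.2.2.insert i r.2.2))))
      none = none := by
  induction is with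
  | nil => rfl
  | cons i is ih => simpa using ih

theorem bLook_insert (dict : PySem.Dict Int Int) (ch : List Int) (v : Int)
    (h : ∀ q, dict.getD (q - 1) 0 = bLook ch q) :
    ∀ q, (dict.insert ((ch.length : Int)) v).getD (q - 1) 0 = bLook (ch ++ [v]) q := by
  intro q
  rw [PySem.Dict.getD_insert]
  by_cases hq : q - 1 = (ch.length : Int)
  · rw [if_pos hq]
    simp only [bLook, List.length_append, List.length_cons, List.length_nil]
    rw [if_pos (by push_cast; omega)]
    have hn : (q - 1).toNat = ch.length := by omega
    rw [hn]
    simp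
  · rw [if_neg hq, h q]
    simp only [bLook, List.length_append, List.length_cons, List.length_nil]
    by_cases h1 : 0 ≤ q - 1 ∧ q - 1 < (ch.length : Int)
    · rw [if_pos h1, if_pos (by push_cast; omega)]
      have hlt : (q - 1).toNat < ch.length := by omega
      rw [List.getD_eq_getElem?_getD, List.getD_eq_getElem?_getD,
          List.getElem?_append_left hlt]
    · rw [if_neg h1, if_neg (by push_cast; omega)]

-- simulation of the children loop: if A's fold over the next n child indices succeeds, B's
-- machine (about to read the first child's header, with n children still owed to the top frame)
-- runs to the completion of that frame.
theorem childSim (fuel : Nat)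
    (IH : ∀ data d c v, parseA fuel data = some (d, c, v) →
      ∀ t stack, bRun data t stack = afterChild d (t + c) stack v) :
    ∀ (n : Nat) (j : Int) dat p1 (dict : PySem.Dict Int Int) out,
      (PySem.List.pyRange j (j + (n : Int)) 1).foldl
        (fun acc i => acc.bind (fun s : List Int × Int × PySem.Dict Int Int =>
          (parseA fuel s.1).map (fun r => (r.1, s.2.1 + r.2.1, s.2.2.insert i r.2.2))))
        (some (dat, p1, dict)) = some out →
      ∀ ch, (∀ q, dict.getD (q - 1) 0 = bLook ch q) → j = (ch.length : Int) →
      0 < n →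
      ∀ t stack kids0 met0,
      bRun dat t (((n : Int), kids0, met0, ch) :: stack) =
        afterChild (PySem.List.slice out.1 (some met0) none)
          (t + (out.2.1 - p1) + (PySem.List.slice out.1 none (some met0)).sum) stack
          (if kids0 = 0 then (PySem.List.slice out.1 none (some met0)).sum
           else ((PySem.List.slice out.1 none (some met0)).map (fun i => out.2.2.getD (i - 1) 0)).sum) := by
  intro n
  induction n with
  | zero => intro j dat p1 dict out hfold ch hch hj hn; omega
  | succ n ihn =>
    intro j dat p1 dict out hfold ch hch hj _ t stack kids0 met0
    rw [PySem.List.pyRange_one_cons (by push_cast; omega)] at hfold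
    simp only [List.foldl_cons, Option.bind_some] at hfold
    rcases hp : parseA fuel dat with _ | ⟨⟨d1, c1, v1⟩⟩ <;> rw [hp] at hfold
    · rw [Option.map_none, foldA_none] at hfold
      exact absurd hfold (by simp)
    rw [Option.map_some] at hfold
    dsimp only at hfold
    have hrun := IH dat d1 c1 v1 hp t ((((n : Int) + 1), kids0, met0, ch) :: stack)
    push_cast
    rw [hrun]
    simp only [afterChild, add_sub_cancel_right]
    have hch' := bLook_insert dict ch v1 hch
    rw [← hj] at hch'
    rcases Nat.eq_zero_or_pos n with hn0 | hnpos
    · -- last child: the frame completes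
      subst hn0
      push_cast at hfold
      rw [PySem.List.pyRange_one_eq_nil (le_refl _), List.foldl_nil] at hfold
      simp only [Option.some.injEq] at hfold
      subst hfold
      simp only [Nat.cast_zero, bComplete]
      rw [bCompleteGo]
      simp only [le_refl, if_pos]
      have hval : ((PySem.List.slice d1 none (some met0)).map (bLook (ch ++ [v1]))).sum
          = ((PySem.List.slice d1 none (some met0)).map
              (fun i => ((dict.insert j v1).getD (i - 1) 0))).sum := by
        congr 1
        apply List.map_congr_left
        intro i _
        rw [hch' i]
      cases stack with
      | nil =>
        simp only [afterChild]
        by_cases hk : kids0 = 0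
        · simp only [if_pos hk, Option.some.injEq, Prod.mk.injEq]
          exact ⟨trivial, by ring, trivial⟩
        · simp only [if_neg hk, hval, Option.some.injEq, Prod.mk.injEq]
          exact ⟨trivial, by ring, trivial⟩
      | cons fr2 rest2 =>
        obtain ⟨rem2, k2, m2, c2⟩ := fr2
        simp only [afterChild]
        by_cases hk : kids0 = 0
        · simp only [if_pos hk]
          congr 2
          ring
        · simp only [if_neg hk, hval]
          congr 3
          ring
    · -- more children owed: the frame survives, back to the outer loop for the next child
      have hngt : ¬ ((n : Int) ≤ 0) := by omega
      simp only [bComplete]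
      rw [bCompleteGo]
      simp only [if_neg hngt]
      have hstep := ihn (j+1) d1 (p1 + c1) (dict.insert j v1) out
        (by rw [show j + 1 + (n : Int) = j + ((n : Int) + 1) by ring]; exact hfold)
        (ch ++ [v1]) hch' (by simp [hj]) hnpos (t + c1) stack kids0 met0
      rw [hstep]
      congr 2
      ring

-- main simulation: a successful parseA run is matched by B's machine from any state in which
-- it is about to read that node's header.
theorem mainSim : ∀ fuel data d c v, parseA fuel data = some (d, c, v) →
    ∀ t stack, bRun data t stack = afterChild d (t + c) stack v := by
  intro fuel
  induction fuel with
  | zero => intro data d c v h; exact absurd h (by simp [parseA])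
  | succ fuel ih =>
    intro data d c v h t stack
    match data with
    | [] => exact absurd h (by simp [parseA])
    | [_] => exact absurd h (by simp [parseA])
    | kids :: met :: rest =>
      rw [parseA] at h
      rcases hf : (PySem.List.pyRange 0 kids 1).foldl
          (fun acc i => acc.bind (fun s : List Int × Int × PySem.Dict Int Int =>
            (parseA fuel s.1).map (fun r => (r.1, s.2.1 + r.2.1, s.2.2.insert i r.2.2))))
          (some (rest, (0 : Int), (PySem.Dict.empty : PySem.Dict Int Int)))
        with _ | ⟨⟨d0, p1, dict⟩⟩ <;> rw [hf] at h
      · exact absurd h (by simp)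
      simp only [Option.some.injEq, Prod.mk.injEq] at h
      obtain ⟨hd, hc, hv⟩ := h
      by_cases hk : kids ≤ 0
      · -- range(kids) is empty
        rw [PySem.List.pyRange_one_eq_nil hk, List.foldl_nil] at hf
        simp only [Option.some.injEq, Prod.mk.injEq] at hf
        obtain ⟨h1, h2, h3⟩ := hf
        subst h1 h2 h3
        rw [bRun_cons]
        simp only [bComplete]
        rw [bCompleteGo]
        simp only [if_pos hk]
        have hval : (if kids = 0 then (PySem.List.slice rest none (some met)).sum
              else ((PySem.List.slice rest none (some met)).map (bLook [])).sum) = v := by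
          rw [← hv]
          by_cases h0 : kids = 0
          · simp [h0]
          · rw [if_neg h0, if_neg h0]
            congr 1
            apply List.map_congr_left
            intro i _
            simp [bLook, PySem.Dict.getD_empty]
        have hc' : t + c = t + (PySem.List.slice rest none (some met)).sum := by omega
        cases stack with
        | nil =>
          simp only [afterChild]
          rw [hval, ← hd, hc']
        | cons fr rest2 =>
          obtain ⟨rem2, k2, m2, c2⟩ := fr
          simp only [afterChild, bComplete]
          rw [hval, ← hd, hc']
      · -- kids > 0 children
        have hkpos : 0 < kids.toNat := by omega
        have hcast : (kids.toNat : Int) = kids := by omega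
        rw [show (0 : Int) = (0 : Int) + 0 by ring, show kids = (0 : Int) + 0 + (kids.toNat : Int) by omega] at hf
        have hsim := childSim fuel ih kids.toNat (0 + 0) rest 0 PySem.Dict.empty (d0, p1, dict) hf
          [] (by intro q; simp [bLook, PySem.Dict.getD_empty]) (by simp) hkpos
          t stack kids met
        rw [bRun_cons]
        simp only [bComplete]
        rw [bCompleteGo]
        simp only [if_neg hk]
        rw [hcast] at hsim
        rw [hsim]
        dsimp only
        have harith : t + (p1 - 0) + (PySem.List.slice d0 none (some met)).sum = t + c := by
          omega
        rw [harith, hd, hv]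

-- skipF only shortens the data
theorem skipF_length : ∀ f n d r, skipF f n d = some r → r.length ≤ d.length := by
  intro f
  induction f with
  | zero =>
    intro n d r h
    match n with
    | 0 => simp only [skipF, Option.some.injEq] at h; subst h; exact le_rfl
    | _+1 => exact absurd h (by simp [skipF])
  | succ f ihf =>
    intro n d r h
    match n with
    | 0 => simp only [skipF, Option.some.injEq] at h; subst h; exact le_rfl
    | n+1 =>
      match d with
      | [] => exact absurd h (by simp [skipF])
      | [_] => exact absurd h (by simp [skipF])
      | k :: m :: rest =>
        rw [skipF] at h
        rcases h1 : skipF f k.toNat rest with _ | r1 <;> rw [h1] at h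
        · exact absurd h (by simp)
        simp only [Option.bind_some] at h
        have hr1 := ihf _ _ _ h1
        have hr := ihf _ _ _ h
        have hs : (PySem.List.slice r1 (some m) none).length ≤ r1.length := by
          simp [PySem.List.slice_some_none]
        simp only [List.length_cons]
        omega

-- sufficiency: a successful skipF walk over n nodes means A's children fold succeeds (with any
-- fuel exceeding the data length) and ends at the same remainder.
theorem skipF_fold : ∀ f (n : Nat) (j : Int) dat r, skipF f n dat = some r →
    ∀ fuelA, dat.length < fuelA →
    ∀ p1 (dict : PySem.Dict Int Int), ∃ p1' dict',
      (PySem.List.pyRange j (j + (n : Int)) 1).foldl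
        (fun acc i => acc.bind (fun s : List Int × Int × PySem.Dict Int Int =>
          (parseA fuelA s.1).map (fun r => (r.1, s.2.1 + r.2.1, s.2.2.insert i r.2.2))))
        (some (dat, p1, dict)) = some (r, p1', dict') := by
  intro f
  induction f with
  | zero =>
    intro n j dat r h fuelA hlen p1 dict
    match n with
    | 0 =>
      simp only [skipF, Option.some.injEq] at h; subst h
      exact ⟨p1, dict, by rw [show j + ((0:Nat):Int) = j by push_cast; ring,
        PySem.List.pyRange_one_eq_nil (le_refl _), List.foldl_nil]⟩
    | _+1 => exact absurd h (by simp [skipF])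
  | succ f ihf =>
    intro n j dat r h fuelA hlen p1 dict
    match n with
    | 0 =>
      simp only [skipF, Option.some.injEq] at h; subst h
      exact ⟨p1, dict, by rw [show j + ((0:Nat):Int) = j by push_cast; ring,
        PySem.List.pyRange_one_eq_nil (le_refl _), List.foldl_nil]⟩
    | n+1 =>
      match dat with
      | [] => exact absurd h (by simp [skipF])
      | [_] => exact absurd h (by simp [skipF])
      | k :: m :: rest =>
        rw [skipF] at h
        rcases h1 : skipF f k.toNat rest with _ | r1 <;> rw [h1] at h
        · exact absurd h (by simp)
        simp only [Option.bind_some] at h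
        match fuelA, hlen with
        | fa+1, hlen =>
        have hrest : rest.length < fa := by
          simp only [List.length_cons] at hlen; omega
        obtain ⟨p1c, dictc, hfoldc⟩ := ihf k.toNat 0 rest r1 h1 fa hrest 0 PySem.Dict.empty
        have hnode : parseA (fa+1) (k :: m :: rest) =
            some (PySem.List.slice r1 (some m) none,
              p1c + (PySem.List.slice r1 none (some m)).sum,
              if k = 0 then (PySem.List.slice r1 none (some m)).sum
              else ((PySem.List.slice r1 none (some m)).map (fun i => dictc.getD (i - 1) 0)).sum) := by
          rw [parseA]
          have hrange : PySem.List.pyRange 0 k 1 = PySem.List.pyRange 0 (0 + (k.toNat : Int)) 1 := by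
            by_cases hk : 0 ≤ k
            · congr 1; omega
            · rw [PySem.List.pyRange_one_eq_nil (by omega), PySem.List.pyRange_one_eq_nil (by push_cast; omega)]
          rw [hrange, hfoldc]
        have hslen : (PySem.List.slice r1 (some m) none).length < fa + 1 := by
          have hl1 := skipF_length f k.toNat rest r1 h1
          have hs : (PySem.List.slice r1 (some m) none).length ≤ r1.length := by
            simp [PySem.List.slice_some_none]
          simp only [List.length_cons] at hlen; omega
        obtain ⟨p1', dict', hfold'⟩ := ihf n (j+1) (PySem.List.slice r1 (some m) none) r h
          (fa+1) hslen (p1 + _) (dict.insert j _)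
        refine ⟨p1', dict', ?_⟩
        rw [PySem.List.pyRange_one_cons (by push_cast; omega), List.foldl_cons]
        simp only [Option.bind_some, hnode, Option.map_some]
        rw [show j + (((n:Nat)+1 : Nat) : Int) = j + 1 + (n : Int) by push_cast; ring]
        exact hfold'

theorem parseA_of_pre (data : List Int) (h : Pre_parse data) :
    ∃ r c v, parseA (data.length + 1) data = some (r, c, v) := by
  unfold Pre_parse at h
  rcases hs : skipF (data.length + 1) 1 data with _ | r
  · rw [hs] at h; simp at h
  match data, hs with
  | [], hs => exact absurd hs (by simp [skipF])
  | [_], hs => exact absurd hs (by simp [skipF])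
  | k :: m :: rest, hs =>
    rw [skipF] at hs
    rcases h1 : skipF (k :: m :: rest).length k.toNat rest with _ | r1 <;> rw [h1] at hs
    · exact absurd hs (by simp)
    simp only [Option.bind_some, skipF] at hs
    have hrest : rest.length < (k :: m :: rest).length := by simp
    obtain ⟨p1', dict', hfold⟩ := skipF_fold _ k.toNat 0 rest r1 h1 _ hrest 0 PySem.Dict.empty
    have hnode : parseA ((k :: m :: rest).length + 1) (k :: m :: rest) =
        some (PySem.List.slice r1 (some m) none,
          p1' + (PySem.List.slice r1 none (some m)).sum,
          if k = 0 then (PySem.List.slice r1 none (some m)).sum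
          else ((PySem.List.slice r1 none (some m)).map (fun i => dict'.getD (i - 1) 0)).sum) := by
      rw [parseA]
      have hrange : PySem.List.pyRange 0 k 1 = PySem.List.pyRange 0 (0 + (k.toNat : Int)) 1 := by
        by_cases hk : 0 ≤ k
        · congr 1; omega
        · rw [PySem.List.pyRange_one_eq_nil (by omega), PySem.List.pyRange_one_eq_nil (by push_cast; omega)]
      rw [hrange, hfold]
    exact ⟨_, _, _, hnode⟩

-- ===== VERDICT (by name: the statement is the Claim_ definition above) =====
theorem parse_spec : Claim_equal_parse := by
  intro data _ hpre
  unfold Spec_parse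
  obtain ⟨r, c, v, hA⟩ := parseA_of_pre data hpre
  have hB := mainSim (data.length + 1) data r c v hA 0 []
  simp only [afterChild, zero_add] at hB
  unfold parse parse_alt
  rw [hA, hB]
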